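-- pv_equiv track=rewrite | github.com/modenl/entropyandmeaning | src/pdf_to_md_chapters.py | normalize_text_to_markdown
-- ===== SOURCE A (Python) =====
-- def normalize_text_to_markdown(text: str) -> str:
--     # Collapse multiple blank lines to max two
--     lines = text.splitlines()
--     out = []
--     blank = 0
--     for ln in lines:
--         if ln.strip() == "":
--             blank += 1
--         else:
--             blank = 0
--         if blank <= 2:
--             out.append(ln.rstrip())
--     return "\n".join(out).strip() + "\n"
-- ===== SOURCE B (Python) =====
-- def normalize_text_to_markdown(text: str) -> str:
--     # Walk the lines as runs of consecutive blank / non-blank lines: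
--     # a blank run contributes at most two empty lines, a non-blank run
--     # contributes each of its lines right-stripped.
--     lines = text.splitlines()
--     n = len(lines)
--     pieces = []
--     i = 0
--     while i < n:
--         j = i
--         if lines[i].strip() == "":
--             while j < n and lines[j].strip() == "":
--                 j += 1
--             pieces.extend([""] * min(j - i, 2))
--         else:
--             while j < n and lines[j].strip() != "":
--                 j += 1
--             pieces.extend(l.rstrip() for l in lines[i:j])
--         i = j
--     return "\n".join(pieces).strip() + "\n"
-- ===== Notes on version B (the rewrite author's own statement) =====
-- stated objective: idiomatic
-- what changed: Replaces the per-line blank counter with a two-level scan that groups consecutive runs of blank/non-blank lines: a blank run emits min(len,2) empty lines, a non-blank run emits its lines rstripped.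
import Mathlib
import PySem

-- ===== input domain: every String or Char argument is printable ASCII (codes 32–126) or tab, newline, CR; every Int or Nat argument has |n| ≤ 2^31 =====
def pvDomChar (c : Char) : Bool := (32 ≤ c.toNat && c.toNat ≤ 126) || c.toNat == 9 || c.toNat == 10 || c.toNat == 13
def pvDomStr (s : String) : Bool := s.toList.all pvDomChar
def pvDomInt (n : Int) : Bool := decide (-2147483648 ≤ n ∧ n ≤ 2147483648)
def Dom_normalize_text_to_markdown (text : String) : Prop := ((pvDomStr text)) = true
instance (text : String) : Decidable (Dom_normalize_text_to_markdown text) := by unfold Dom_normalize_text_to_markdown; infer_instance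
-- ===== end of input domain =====

-- B rewrites A's per-line blank counter as a scan over runs of consecutive blank / non-blank
-- lines (idiomatic run-grouping); same O(n) cost, same return value everywhere.

-- ===== PORT A =====
-- one step of A's loop: update the blank counter, append ln.rstrip() while blank <= 2
def pvStepA (st : List String × Nat) (ln : String) : List String × Nat :=
  let blank := if PySem.Str.strip ln == "" then st.2 + 1 else 0
  (if blank ≤ 2 then st.1 ++ [PySem.Str.rstrip ln] else st.1, blank)

def normalize_text_to_markdown (text : String) : String :=
  let lines := PySem.Str.splitlines text
  let st := List.foldl pvStepA ([], 0) lines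
  PySem.Str.strip (PySem.Str.join "\n" st.1) ++ "\n"

-- ===== PORT B =====
-- Source B's outer while-loop: take the maximal run starting at the current line,
-- emit min(len,2) blanks or the rstripped lines, continue after the run.
def pvRunsGo : Nat → List String → List String
  | _, [] => []
  | 0, _ :: _ => []   -- never reached: pvRuns passes the list's length as fuel
  | fuel + 1, ln :: rest =>
    if (PySem.Str.strip ln == "") = true then
      List.replicate (min (List.takeWhile (fun l => PySem.Str.strip l == "") (ln :: rest)).length 2) ""
        ++ pvRunsGo fuel (List.dropWhile (fun l => PySem.Str.strip l == "") (ln :: rest))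
    else
      List.map PySem.Str.rstrip (List.takeWhile (fun l => !(PySem.Str.strip l == "")) (ln :: rest))
        ++ pvRunsGo fuel (List.dropWhile (fun l => !(PySem.Str.strip l == "")) (ln :: rest))

def pvRuns (lines : List String) : List String := pvRunsGo lines.length lines

def normalize_text_to_markdown_alt (text : String) : String :=
  PySem.Str.strip (PySem.Str.join "\n" (pvRuns (PySem.Str.splitlines text))) ++ "\n"

-- ===== PRECONDITION & SPEC =====
def Spec_normalize_text_to_markdown (text : String) (out : String) : Prop := out = normalize_text_to_markdown_alt text
instance (text : String) (out : String) : Decidable (Spec_normalize_text_to_markdown text out) := by unfold Spec_normalize_text_to_markdown; infer_instance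

-- ===== CLAIM (what is proved, stated in full; the proofs are below) =====
def Claim_equal_normalize_text_to_markdown : Prop := ∀ (text : String), Dom_normalize_text_to_markdown text → Spec_normalize_text_to_markdown text (normalize_text_to_markdown text)

-- ===== LEMMAS AND PROOFS =====

-- proof-only recursive description of A's output list, blank counter as parameter
def pvAbsA : List String → Nat → List String
  | [], _ => []
  | ln :: rest, b =>
    if PySem.Str.strip ln == "" then
      (if b + 1 ≤ 2 then [PySem.Str.rstrip ln] else []) ++ pvAbsA rest (b + 1)
    else
      PySem.Str.rstrip ln :: pvAbsA rest 0

lemma pv_foldA (lines : List String) : ∀ (out : List String) (b : Nat),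
    (List.foldl pvStepA (out, b) lines).1 = out ++ pvAbsA lines b := by
  induction lines with
  | nil => intro out b; simp [pvAbsA]
  | cons ln rest ih =>
    intro out b
    simp only [List.foldl_cons, pvStepA, pvAbsA]
    by_cases hb : (PySem.Str.strip ln == "") = true
    · simp only [hb, if_pos]
      by_cases h2 : b + 1 ≤ 2 <;> simp [h2, ih, List.append_assoc]
    · simp [hb, ih]

-- a line whose strip() is empty rstrip()s to the empty string
lemma pv_rstrip_blank (l : String) (h : (PySem.Str.strip l == "") = true) :
    PySem.Str.rstrip l = "" := by
  rw [beq_iff_eq] at h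
  unfold PySem.Str.strip at h
  have h' : PySem.Chars.strip l.toList = [] := by
    have := congrArg String.toList h
    simpa using this
  unfold PySem.Chars.strip PySem.Chars.rstrip PySem.Chars.lstrip at h'
  have hall : ∀ c ∈ l.toList, PySem.Chars.isspace c = true := by
    have hnil : List.dropWhile PySem.Chars.isspace
        (List.dropWhile PySem.Chars.isspace l.toList).reverse = [] := by
      have := congrArg List.reverse h'
      simpa using this
    rw [List.dropWhile_eq_nil_iff] at hnil
    intro c hc
    rcases List.mem_append.1 (by
        rw [List.takeWhile_append_dropWhile (p := PySem.Chars.isspace)]; exact hc :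
        c ∈ List.takeWhile PySem.Chars.isspace l.toList ++ List.dropWhile PySem.Chars.isspace l.toList) with hm | hm
    · exact List.mem_takeWhile_imp hm
    · exact hnil c (List.mem_reverse.2 hm)
  unfold PySem.Str.rstrip PySem.Chars.rstrip
  have : List.dropWhile PySem.Chars.isspace l.toList.reverse = [] := by
    rw [List.dropWhile_eq_nil_iff]
    intro c hc; exact hall c (List.mem_reverse.1 hc)
  simp [this]

lemma pv_dropWhile_head_false {α : Type} (p : α → Bool) :
    ∀ (l : List α) (h : α) (t : List α), l.dropWhile p = h :: t → p h = false := by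
  intro l
  induction l with
  | nil => intro h t hc; simp [List.dropWhile] at hc
  | cons a l ih =>
    intro h t hc
    rw [List.dropWhile_cons] at hc
    by_cases hp : p a = true
    · rw [if_pos hp] at hc; exact ih _ _ hc
    · rw [if_neg hp] at hc
      cases hc; simpa using hp

-- blank counter is irrelevant when the list is empty or starts non-blank
lemma pv_absA_head_nonblank (rest : List String) (b : Nat)
    (h : ∀ h t, rest = h :: t → (PySem.Str.strip h == "") = false) :
    pvAbsA rest b = pvAbsA rest 0 := by
  cases rest with
  | nil => rfl
  | cons x t => simp [pvAbsA, h x t rfl]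

-- a run of blank lines contributes min(len, 2-b) empty strings
lemma pv_absA_blank_run : ∀ (run : List String) (rest : List String) (b : Nat),
    (∀ l ∈ run, (PySem.Str.strip l == "") = true) →
    pvAbsA (run ++ rest) b =
      List.replicate (min run.length (2 - b)) "" ++ pvAbsA rest (b + run.length) := by
  intro run
  induction run with
  | nil => intro rest b _; simp
  | cons ln run' ih =>
    intro rest b hall
    have hln := hall ln (by simp)
    have hrun' : ∀ l ∈ run', (PySem.Str.strip l == "") = true :=
      fun l hl => hall l (by simp [hl])
    simp only [List.cons_append, pvAbsA, hln, if_pos]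
    rw [ih rest (b + 1) hrun']
    rw [pv_rstrip_blank ln hln]
    have hrepl : (if b + 1 ≤ 2 then [("" : String)] else [])
        ++ List.replicate (min run'.length (2 - (b + 1))) "" =
        List.replicate (min (ln :: run').length (2 - b)) "" := by
      have hcount : (if b + 1 ≤ 2 then 1 else 0) + min run'.length (2 - (b + 1)) =
          min (run'.length + 1) (2 - b) := by split_ifs <;> omega
      calc (if b + 1 ≤ 2 then [("" : String)] else [])
            ++ List.replicate (min run'.length (2 - (b + 1))) ""
          = List.replicate (if b + 1 ≤ 2 then 1 else 0) ""
            ++ List.replicate (min run'.length (2 - (b + 1))) "" := by split_ifs <;> rfl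
        _ = List.replicate ((if b + 1 ≤ 2 then 1 else 0) + min run'.length (2 - (b + 1))) "" := by
            rw [← List.replicate_add]
        _ = List.replicate (min (ln :: run').length (2 - b)) "" := by
            rw [hcount]; simp
    rw [← List.append_assoc, hrepl]
    have : b + 1 + run'.length = b + (ln :: run').length := by simp; omega
    rw [this]

-- a run of non-blank lines contributes its rstripped lines
lemma pv_absA_nonblank_run : ∀ (run : List String) (rest : List String),
    (∀ l ∈ run, (PySem.Str.strip l == "") = false) →
    pvAbsA (run ++ rest) 0 = run.map PySem.Str.rstrip ++ pvAbsA rest 0 := by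
  intro run
  induction run with
  | nil => intro rest _; simp
  | cons ln run' ih =>
    intro rest hall
    have hln := hall ln (by simp)
    have ih' := ih rest (fun l hl => hall l (by simp [hl]))
    simp [pvAbsA, hln, ih']

lemma pv_absA_eq_runsGo : ∀ (fuel : Nat) (lines : List String), lines.length ≤ fuel →
    pvAbsA lines 0 = pvRunsGo fuel lines := by
  intro fuel
  induction fuel with
  | zero =>
    intro lines hle
    cases lines with
    | nil => rfl
    | cons ln rest => simp at hle
  | succ fuel ih =>
    intro lines hle
    cases lines with
    | nil => rfl
    | cons ln rest =>
    by_cases hb : (PySem.Str.strip ln == "") = true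
    · -- blank run
      set p : String → Bool := fun l => PySem.Str.strip l == "" with hp
      have hsplit : (ln :: rest).takeWhile p ++ (ln :: rest).dropWhile p = ln :: rest :=
        List.takeWhile_append_dropWhile
      have htake : ∀ l ∈ (ln :: rest).takeWhile p, (PySem.Str.strip l == "") = true := by
        intro l hl
        have := List.mem_takeWhile_imp hl
        simpa [hp] using this
      have hdropHead : ∀ h t, (ln :: rest).dropWhile p = h :: t → (PySem.Str.strip h == "") = false :=
        fun h t hc => pv_dropWhile_head_false p _ h t hc
      have hdrop_le : ((ln :: rest).dropWhile p).length ≤ fuel := by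
        have : (ln :: rest).dropWhile p = rest.dropWhile p := by
          simp [hp, hb]
        rw [this]
        exact le_trans (List.length_dropWhile_le _ _) (Nat.le_of_succ_le_succ hle)
      calc pvAbsA (ln :: rest) 0
          = pvAbsA ((ln :: rest).takeWhile p ++ (ln :: rest).dropWhile p) 0 := by rw [hsplit]
        _ = List.replicate (min ((ln :: rest).takeWhile p).length (2 - 0)) ""
            ++ pvAbsA ((ln :: rest).dropWhile p) (0 + ((ln :: rest).takeWhile p).length) :=
            pv_absA_blank_run _ _ 0 htake
        _ = List.replicate (min ((ln :: rest).takeWhile p).length 2) ""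
            ++ pvAbsA ((ln :: rest).dropWhile p) 0 := by
            rw [pv_absA_head_nonblank _ _ hdropHead]
        _ = List.replicate (min ((ln :: rest).takeWhile p).length 2) ""
            ++ pvRunsGo fuel ((ln :: rest).dropWhile p) := by
            rw [ih _ hdrop_le]
        _ = pvRunsGo (fuel + 1) (ln :: rest) := by rw [pvRunsGo]; simp [hb, hp]
    · -- non-blank run
      set q : String → Bool := fun l => !(PySem.Str.strip l == "") with hq
      have hqln : q ln = true := by simp [hq, hb]
      have hsplit : (ln :: rest).takeWhile q ++ (ln :: rest).dropWhile q = ln :: rest :=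
        List.takeWhile_append_dropWhile
      have htake : ∀ l ∈ (ln :: rest).takeWhile q, (PySem.Str.strip l == "") = false := by
        intro l hl
        have := List.mem_takeWhile_imp hl
        simpa [hq] using this
      have hdrop_le : ((ln :: rest).dropWhile q).length ≤ fuel := by
        have : (ln :: rest).dropWhile q = rest.dropWhile q := by
          simp [hqln]
        rw [this]
        exact le_trans (List.length_dropWhile_le _ _) (Nat.le_of_succ_le_succ hle)
      calc pvAbsA (ln :: rest) 0
          = pvAbsA ((ln :: rest).takeWhile q ++ (ln :: rest).dropWhile q) 0 := by rw [hsplit]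
        _ = ((ln :: rest).takeWhile q).map PySem.Str.rstrip
            ++ pvAbsA ((ln :: rest).dropWhile q) 0 := pv_absA_nonblank_run _ _ htake
        _ = ((ln :: rest).takeWhile q).map PySem.Str.rstrip
            ++ pvRunsGo fuel ((ln :: rest).dropWhile q) := by rw [ih _ hdrop_le]
        _ = pvRunsGo (fuel + 1) (ln :: rest) := by rw [pvRunsGo]; simp [hb, hq]

lemma pv_absA_eq_runs (lines : List String) : pvAbsA lines 0 = pvRuns lines :=
  pv_absA_eq_runsGo lines.length lines le_rfl

-- ===== VERDICT (by name: the statement is the Claim_ definition above) =====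
theorem normalize_text_to_markdown_spec : Claim_equal_normalize_text_to_markdown := by
  intro text _
  unfold Spec_normalize_text_to_markdown normalize_text_to_markdown normalize_text_to_markdown_alt
  show PySem.Str.strip (PySem.Str.join "\n" (List.foldl pvStepA ([], 0) (PySem.Str.splitlines text)).1) ++ "\n" = _
  have h1 := pv_foldA (PySem.Str.splitlines text) [] 0
  rw [h1, List.nil_append, pv_absA_eq_runs]
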